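-- pv_equiv track=rewrite | github.com/JC-Price/Chalf_public | v4.3/v4.3_no_parallelization/archive/CHalf_v4.3.py | getMinMax_AbsoluteNoneZero
-- ===== SOURCE A (Python) =====
-- def getMinMax_AbsoluteNoneZero(list):
-- 	# NOTE: This uses absolute min and max values of data set to choose Normalize data value...
-- 	nonZlist = []
-- 	for num in list:
-- 		if float(num) != 0:
-- 			nonZlist.append(num)
-- 	minNum = min(nonZlist)
-- 	maxNum = max(nonZlist)
-- 	return minNum, maxNum
-- ===== SOURCE B (Python) =====
-- def getMinMax_AbsoluteNoneZero(list):
-- 	# Single pass: track the running minimum and maximum of the nonzero entries.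
-- 	best = None
-- 	for num in list:
-- 		if float(num) == 0:
-- 			continue
-- 		if best is None:
-- 			best = (num, num)
-- 		else:
-- 			minNum, maxNum = best
-- 			if num < minNum:
-- 				minNum = num
-- 			if num > maxNum:
-- 				maxNum = num
-- 			best = (minNum, maxNum)
-- 	if best is None:
-- 		raise ValueError("no nonzero values in list")
-- 	return best
-- ===== Notes on version B (the rewrite author's own statement) =====
-- stated objective: alternative
-- what changed: B replaces A's build-a-filtered-list-then-two-scans (min, then max) with a single pass maintaining the running (min, max) pair, skipping zeros; Pre_ excludes inputs with no nonzero element, on which A raises ValueError from min() on an empty list.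
-- outside the precondition, e.g. on getMinMax_AbsoluteNoneZero([0, 0]): A raises ValueError, B raises ValueError
import Mathlib
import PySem

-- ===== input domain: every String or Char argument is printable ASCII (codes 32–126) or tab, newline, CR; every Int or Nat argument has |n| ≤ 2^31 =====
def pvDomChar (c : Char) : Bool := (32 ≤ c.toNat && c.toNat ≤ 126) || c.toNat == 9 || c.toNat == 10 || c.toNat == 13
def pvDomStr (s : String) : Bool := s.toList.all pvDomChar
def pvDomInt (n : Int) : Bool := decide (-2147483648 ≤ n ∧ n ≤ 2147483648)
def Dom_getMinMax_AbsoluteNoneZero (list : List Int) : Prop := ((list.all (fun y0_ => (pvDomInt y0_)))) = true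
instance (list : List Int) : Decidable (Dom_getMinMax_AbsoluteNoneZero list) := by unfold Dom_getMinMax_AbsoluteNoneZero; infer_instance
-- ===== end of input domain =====

-- B: one pass maintaining the running (min, max) pair instead of A's filtered list plus two scans; same values on every input with a nonzero element.
-- ===== PORT A =====
def getMinMax_AbsoluteNoneZero (list : List Int) : Int × Int :=
  let nonZlist := list.foldl (fun acc num => if num ≠ 0 then acc ++ [num] else acc) []
  match PySem.List.min? nonZlist (fun x => x), PySem.List.max? nonZlist (fun x => x) with
  | some minNum, some maxNum => (minNum, maxNum)
  | _, _ => (0, 0)  -- unreachable under Pre_ (Python raises ValueError on an empty nonZlist)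

-- ===== PORT B =====
def pvAltStep (best : Option (Int × Int)) (num : Int) : Option (Int × Int) :=
  if num = 0 then best
  else
    match best with
    | none => some (num, num)
    | some (minNum, maxNum) =>
        some ((if num < minNum then num else minNum), (if num > maxNum then num else maxNum))

def getMinMax_AbsoluteNoneZero_alt (list : List Int) : Int × Int :=
  match list.foldl pvAltStep none with
  | some best => best
  | none => (0, 0)  -- unreachable under Pre_ (Python B raises ValueError)

-- ===== PRECONDITION & SPEC =====
-- Pre_ excludes exactly the inputs with no nonzero element, on which A raises ValueError (min of empty list).
def Pre_getMinMax_AbsoluteNoneZero (list : List Int) : Prop := ∃ x ∈ list, x ≠ 0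
instance (list : List Int) : Decidable (Pre_getMinMax_AbsoluteNoneZero list) := by unfold Pre_getMinMax_AbsoluteNoneZero; infer_instance
def pvWitness_getMinMax_AbsoluteNoneZero : List Int := [0, 3, -1]

def Spec_getMinMax_AbsoluteNoneZero (list : List Int) (out : Int × Int) : Prop := out = getMinMax_AbsoluteNoneZero_alt list
instance (list : List Int) (out : Int × Int) : Decidable (Spec_getMinMax_AbsoluteNoneZero list out) := by unfold Spec_getMinMax_AbsoluteNoneZero; infer_instance

-- ===== CLAIM (what is proved, stated in full; the proofs are below) =====
def Claim_equal_getMinMax_AbsoluteNoneZero : Prop := ∀ (list : List Int), Dom_getMinMax_AbsoluteNoneZero list → Pre_getMinMax_AbsoluteNoneZero list → Spec_getMinMax_AbsoluteNoneZero list (getMinMax_AbsoluteNoneZero list)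

-- ===== LEMMAS AND PROOFS =====

theorem pv_filter_foldl (l : List Int) (acc : List Int) :
    l.foldl (fun acc num => if num ≠ 0 then acc ++ [num] else acc) acc
      = acc ++ l.filter (fun x => decide (x ≠ 0)) := by
  induction l generalizing acc with
  | nil => simp
  | cons x t ih =>
    rw [List.foldl_cons, List.filter_cons]
    by_cases hx : x = 0
    · rw [if_neg (by simp [hx]), if_neg (by simp [hx]), ih]
    · rw [if_pos hx, if_pos (by simp [hx]), ih, List.append_assoc, List.singleton_append]

theorem pv_alt_some (l : List Int) (a b : Int) :
    l.foldl pvAltStep (some (a, b))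
      = some ((l.filter (fun x => decide (x ≠ 0))).foldl min a,
              (l.filter (fun x => decide (x ≠ 0))).foldl max b) := by
  induction l generalizing a b with
  | nil => simp
  | cons x t ih =>
    rw [List.foldl_cons, List.filter_cons]
    by_cases hx : x = 0
    · rw [if_neg (by simp [hx]),
        show pvAltStep (some (a, b)) x = some (a, b) from by simp [pvAltStep, hx], ih]
    · have h1 : (if x < a then x else a) = min a x := by rw [min_def]; split_ifs <;> omega
      have h2 : (if x > b then x else b) = max b x := by rw [max_def]; split_ifs <;> omega
      rw [if_pos (by simp [hx]),
        show pvAltStep (some (a, b)) x = some (min a x, max b x) from by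
          simp only [pvAltStep, if_neg hx, h1, h2],
        ih, List.foldl_cons, List.foldl_cons]

theorem pv_alt_none (l : List Int) :
    l.foldl pvAltStep none
      = match l.filter (fun x => decide (x ≠ 0)) with
        | [] => none
        | y :: t => some (t.foldl min y, t.foldl max y) := by
  induction l with
  | nil => simp
  | cons x t ih =>
    rw [List.foldl_cons, List.filter_cons]
    by_cases hx : x = 0
    · rw [if_neg (by simp [hx]),
        show pvAltStep none x = none from by simp [pvAltStep, hx], ih]
    · rw [if_pos (by simp [hx]),
        show pvAltStep none x = some (x, x) from by simp [pvAltStep, hx], pv_alt_some]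

theorem getMinMax_AbsoluteNoneZero_spec : Claim_equal_getMinMax_AbsoluteNoneZero := by
  intro list _ hpre
  unfold Spec_getMinMax_AbsoluteNoneZero getMinMax_AbsoluteNoneZero getMinMax_AbsoluteNoneZero_alt
  rw [pv_alt_none, pv_filter_foldl, List.nil_append]
  have hne : list.filter (fun x => decide (x ≠ 0)) ≠ [] := by
    obtain ⟨x, hx, hx0⟩ := hpre
    intro h
    have hmem : x ∈ list.filter (fun x => decide (x ≠ 0)) := by
      simp [List.mem_filter, hx, hx0]
    rw [h] at hmem
    simp at hmem
  obtain ⟨y, t, hyt⟩ := List.exists_cons_of_ne_nil hne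
  rw [hyt]
  simp only [PySem.List.min?_id_cons, PySem.List.max?_id_cons]
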